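-- pv_equiv track=rewrite | github.com/k1eu/Python-2020 | level1/p4/zera_i_jedynki.py | ile_zer
-- ===== SOURCE A (Python) =====
-- def ile_zer(tab):
--     jedynka_index = znajdz_jedynke(tab)
--     jedynka_ost_index = rindex(tab, 1)
--     sum = 0
--
--     for i in range(jedynka_index,jedynka_ost_index):
--         if tab[i] == 0:
--             sum += 1
--     return sum
--
-- def znajdz_jedynke(tab):
--     return tab.index(1)
--
-- def rindex(mylist, myvalue):
--     return len(mylist) - mylist[::-1].index(myvalue) - 1
-- ===== SOURCE B (Python) =====
-- def ile_zer(tab):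
--     seen = False
--     pending = 0
--     total = 0
--     for x in tab:
--         if x == 1:
--             if seen:
--                 total += pending
--             seen = True
--             pending = 0
--         elif x == 0 and seen:
--             pending += 1
--     if not seen:
--         raise ValueError("1 is not in list")
--     return total
-- ===== Notes on version B (the rewrite author's own statement) =====
-- stated objective: simpler
-- what changed: Replaced the two index scans (index, reversed-list rindex) plus an indexed range loop with a single left-to-right pass maintaining seen_one, pending zeros and a running total.
import Mathlib
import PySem

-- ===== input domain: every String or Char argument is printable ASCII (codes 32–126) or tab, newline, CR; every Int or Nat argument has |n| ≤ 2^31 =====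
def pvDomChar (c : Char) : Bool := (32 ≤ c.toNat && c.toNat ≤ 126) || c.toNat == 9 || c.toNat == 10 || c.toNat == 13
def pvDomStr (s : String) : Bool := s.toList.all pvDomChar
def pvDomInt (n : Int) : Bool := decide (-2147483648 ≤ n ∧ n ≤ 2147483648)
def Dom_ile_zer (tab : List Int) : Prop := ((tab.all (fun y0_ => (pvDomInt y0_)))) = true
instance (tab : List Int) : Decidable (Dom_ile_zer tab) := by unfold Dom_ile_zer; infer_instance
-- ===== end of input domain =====

-- B replaces A's two index scans and indexed range loop by one pass with seen/pending/total (simpler, single pass).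

-- ===== PORT A =====
def znajdz_jedynke (tab : List Int) : Option Nat :=
  PySem.List.index? tab 1          -- tab.index(1); none = ValueError, excluded by Pre_

def rindex (mylist : List Int) (myvalue : Int) : Option Int :=
  match PySem.List.slice? mylist none none (-1) with   -- mylist[::-1]
  | none => none
  | some rev =>
      (PySem.List.index? rev myvalue).map
        (fun idx => (mylist.length : Int) - (idx : Int) - 1)

def ile_zer (tab : List Int) : Int :=
  match znajdz_jedynke tab, rindex tab 1 with
  | some jedynka_index, some jedynka_ost_index =>
      -- for i in range(i0, j0): if tab[i] == 0: sum += 1   (i always in range here)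
      (PySem.List.pyRange (jedynka_index : Int) jedynka_ost_index 1).foldl
        (fun sum i => if PySem.List.pyGetD tab i 0 == 0 then sum + 1 else sum) 0
  | _, _ => 0   -- Python raises ValueError here; excluded by Pre_

-- ===== PORT B =====
def ileZerLoop : List Int → (Bool × Int × Int) → (Bool × Int × Int)
  | [], st => st
  | x :: xs, (seen, pending, total) =>
      if x == 1 then
        ileZerLoop xs (true, 0, if seen then total + pending else total)
      else if x == 0 && seen then
        ileZerLoop xs (seen, pending + 1, total)
      else
        ileZerLoop xs (seen, pending, total)

def ile_zer_alt (tab : List Int) : Int :=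
  match ileZerLoop tab (false, 0, 0) with
  | (seen, _, total) => if seen then total else 0   -- Python raises ValueError when ¬seen; excluded by Pre_

-- ===== PRECONDITION & SPEC =====
-- Pre_ excludes exactly the inputs with no 1, on which A (tab.index(1)) raises ValueError — and so does B.
def Pre_ile_zer (tab : List Int) : Prop := (1 : Int) ∈ tab
instance (tab : List Int) : Decidable (Pre_ile_zer tab) := by unfold Pre_ile_zer; infer_instance
def pvWitness_ile_zer : List Int := [0, 1, 0, 0, 1, 0]

def Spec_ile_zer (tab : List Int) (out : Int) : Prop := out = ile_zer_alt tab
instance (tab : List Int) (out : Int) : Decidable (Spec_ile_zer tab out) := by unfold Spec_ile_zer; infer_instance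

-- ===== CLAIM (what is proved, stated in full; the proofs are below) =====
def Claim_equal_ile_zer : Prop := ∀ (tab : List Int), Dom_ile_zer tab → Pre_ile_zer tab → Spec_ile_zer tab (ile_zer tab)

-- ===== LEMMAS AND PROOFS =====

-- number of zeros in a list, as an Int
def czeros (l : List Int) : Int := (l.countP (fun x => x == 0) : Int)

theorem czeros_cons (x : Int) (l : List Int) :
    czeros (x :: l) = (if x == 0 then 1 else 0) + czeros l := by
  simp only [czeros, List.countP_cons]
  by_cases h : x = 0 <;> simp [h] <;> omega

-- B's loop after the last 1: accumulates pending, total untouched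
theorem ileZerLoop_no_one_true (l : List Int) (p t : Int) (h : (1 : Int) ∉ l) :
    ileZerLoop l (true, p, t) = (true, p + czeros l, t) := by
  induction l generalizing p with
  | nil => simp [ileZerLoop, czeros]
  | cons x xs ih =>
      simp only [List.mem_cons, not_or] at h
      have hx1 : (x == (1:Int)) = false := by
        simp; intro hx; exact h.1 hx.symm
      by_cases hx0 : x = 0
      · subst hx0
        simp only [ileZerLoop, hx1, Bool.false_eq_true, if_false]
        simp only [beq_self_eq_true, Bool.true_and, if_true]
        rw [ih _ h.2, czeros_cons]
        simp; ring_nf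
      · simp only [ileZerLoop, hx1, Bool.false_eq_true, if_false]
        rw [if_neg (by simp [hx0]), ih _ h.2, czeros_cons]
        simp [hx0]

-- B's loop between the first and last 1
theorem ileZerLoop_mid (mid post : List Int) (p t : Int) :
    ileZerLoop (mid ++ 1 :: post) (true, p, t)
      = ileZerLoop post (true, 0, t + p + czeros mid) := by
  induction mid generalizing p t with
  | nil => simp [ileZerLoop, czeros]
  | cons x xs ih =>
      by_cases hx1 : x = 1
      · subst hx1
        simp only [List.cons_append, ileZerLoop, beq_self_eq_true, if_true]
        rw [ih, czeros_cons]
        simp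
      · by_cases hx0 : x = 0
        · subst hx0
          simp only [List.cons_append, ileZerLoop]
          rw [if_neg (by simp), if_pos (by simp), ih, czeros_cons]
          simp; ring_nf
        · simp only [List.cons_append, ileZerLoop]
          rw [if_neg (by simp [hx1]), if_neg (by simp [hx0]), ih, czeros_cons]
          simp [hx0]

theorem ileZerLoop_skip (pre l : List Int) (h : (1 : Int) ∉ pre) :
    ileZerLoop (pre ++ l) (false, 0, 0) = ileZerLoop l (false, 0, 0) := by
  induction pre with
  | nil => rfl
  | cons x xs ih =>
      simp only [List.mem_cons, not_or] at h
      simp only [List.cons_append, ileZerLoop]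
      rw [if_neg (by simp; intro hx; exact h.1 hx.symm)]
      rw [if_neg (by simp)]
      exact ih h.2

-- A's counting loop over range(a, a+b) equals countP on the corresponding segment
theorem foldl_count_range (tab : List Int) (b : Nat) :
    ∀ (a : Nat) (s0 : Int), a + b ≤ tab.length →
    (PySem.List.pyRange (a : Int) ((a : Int) + (b : Int)) 1).foldl
        (fun sum i => if PySem.List.pyGetD tab i 0 == 0 then sum + 1 else sum) s0
      = s0 + czeros ((tab.drop a).take b) := by
  induction b with
  | zero =>
      intro a s0 _
      rw [PySem.List.pyRange_one_eq_nil (by omega)]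
      simp [czeros]
  | succ n ih =>
      intro a s0 hab
      have ha : a < tab.length := by omega
      rw [PySem.List.pyRange_one_cons (by push_cast; omega)]
      simp only [List.foldl_cons]
      have hget : PySem.List.pyGetD tab (a : Int) 0 = tab[a] := by
        rw [PySem.List.pyGetD_natCast]; simp [List.getD, ha]
      have hdrop : tab.drop a = tab[a] :: tab.drop (a + 1) :=
        List.drop_eq_getElem_cons ha
      have hcast : ((a : Int) + 1) = ((a + 1 : Nat) : Int) := by push_cast; ring
      have hcast2 : ((a : Int) + ((n + 1 : Nat) : Int)) = ((a + 1 : Nat) : Int) + (n : Int) := by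
        push_cast; ring
      rw [hget, hcast2, hcast, ih (a + 1) _ (by omega)]
      rw [hdrop, List.take_succ_cons, czeros_cons]
      split <;> ring

-- decomposition at the first occurrence of 1
theorem first_split (l : List Int) (h : (1 : Int) ∈ l) :
    ∃ pre rest, l = pre ++ 1 :: rest ∧ (1 : Int) ∉ pre := by
  have hs : (PySem.List.index? l (1 : Int)).isSome := by
    rw [PySem.List.index?_isSome_iff]; exact h
  obtain ⟨k, hk⟩ := Option.isSome_iff_exists.mp hs
  obtain ⟨pre, suf, he, _, hn⟩ := (PySem.List.index?_eq_some_iff _ _ _).mp hk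
  exact ⟨pre, suf, he, hn⟩

theorem index?_first (pre rest : List Int) (h : (1 : Int) ∉ pre) :
    PySem.List.index? (pre ++ 1 :: rest) 1 = some pre.length :=
  (PySem.List.index?_eq_some_iff _ _ _).mpr ⟨pre, rest, rfl, rfl, h⟩

-- ===== VERDICT (by name: the statement is the Claim_ definition above) =====
theorem ile_zer_spec : Claim_equal_ile_zer := by
  intro tab _ hpre
  unfold Spec_ile_zer
  obtain ⟨pre, rest, htab, hpre1⟩ := first_split tab hpre
  by_cases hrest : (1 : Int) ∈ rest
  · -- a last 1 exists strictly after the first: rest = mid ++ 1 :: post, 1 ∉ post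
    obtain ⟨rp, rr, hrev, hrp⟩ := first_split rest.reverse (by simpa using hrest)
    have hrest_eq : rest = rr.reverse ++ 1 :: rp.reverse := by
      have := congrArg List.reverse hrev
      simpa using this
    set mid := rr.reverse with hmid
    set post := rp.reverse with hpost
    have hpost1 : (1 : Int) ∉ post := by simpa [hpost] using hrp
    have htab2 : tab = pre ++ 1 :: (mid ++ 1 :: post) := by rw [htab, hrest_eq]
    -- A side
    have hi : znajdz_jedynke tab = some pre.length := by
      rw [znajdz_jedynke, htab2]; exact index?_first _ _ hpre1
    have hrevtab : tab.reverse = post.reverse ++ 1 :: (mid.reverse ++ 1 :: pre.reverse) := by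
      rw [htab2]; simp
    have hj : rindex tab 1 = some ((pre.length : Int) + (mid.length : Int) + 1) := by
      rw [rindex, PySem.List.slice?_none_none_neg_one]
      dsimp only
      rw [hrevtab, index?_first _ _ (by simpa [hpost] using hrp)]
      simp [htab2]
      ring
    have hlen : pre.length + (mid.length + 1) ≤ tab.length := by
      rw [htab2]; simp
    have hA : ile_zer tab = czeros mid := by
      rw [ile_zer, hi, hj]
      dsimp only
      have hc : ((pre.length : Int) + (mid.length : Int) + 1)
          = (pre.length : Int) + ((mid.length + 1 : Nat) : Int) := by push_cast; ring
      rw [hc, foldl_count_range tab (mid.length + 1) pre.length 0 hlen]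
      have hdrop : tab.drop pre.length = 1 :: (mid ++ 1 :: post) := by
        rw [htab2, List.drop_left' rfl]
      rw [hdrop, List.take_succ_cons, czeros_cons]
      have : (mid ++ 1 :: post).take mid.length = mid := List.take_left
      rw [this]
      simp
    -- B side
    have hB : ile_zer_alt tab = czeros mid := by
      rw [ile_zer_alt, htab2, ileZerLoop_skip _ _ hpre1]
      show (match ileZerLoop (1 :: (mid ++ 1 :: post)) (false, 0, 0) with
            | (seen, _, total) => if seen then total else 0) = czeros mid
      simp only [ileZerLoop, beq_self_eq_true, if_true]
      rw [ileZerLoop_mid, ileZerLoop_no_one_true _ _ _ hpost1]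
      simp
    rw [hA, hB]
  · -- the only 1: range(i, j) is empty and B's total stays 0
    have hi : znajdz_jedynke tab = some pre.length := by
      rw [znajdz_jedynke, htab]; exact index?_first _ _ hpre1
    have hrevtab : tab.reverse = rest.reverse ++ 1 :: pre.reverse := by
      rw [htab]; simp
    have hj : rindex tab 1 = some (pre.length : Int) := by
      rw [rindex, PySem.List.slice?_none_none_neg_one]
      dsimp only
      rw [hrevtab, index?_first _ _ (by simpa using hrest)]
      simp [htab]
      ring
    have hA : ile_zer tab = 0 := by
      rw [ile_zer, hi, hj]
      dsimp only
      rw [PySem.List.pyRange_one_eq_nil (le_refl _)]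
      rfl
    have hB : ile_zer_alt tab = 0 := by
      rw [ile_zer_alt, htab, ileZerLoop_skip _ _ hpre1]
      show (match ileZerLoop (1 :: rest) (false, 0, 0) with
            | (seen, _, total) => if seen then total else 0) = 0
      simp only [ileZerLoop, beq_self_eq_true, if_true]
      rw [ileZerLoop_no_one_true _ _ _ hrest]
      simp
    rw [hA, hB]
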